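-- pv_equiv track=rewrite | github.com/zEuS1773/CompSci | 07.py | is_bijective
-- ===== SOURCE A (Python) =====
-- def is_bijective(set1):
--   yuh_yuh = True
--   the_list_cuh = []
--   for i in set1:
--     b = set1[i]
--     if b in the_list_cuh:
--       yuh_yuh = False
--       break
--     else:
--       the_list_cuh.append(b)
--   return yuh_yuh
-- ===== SOURCE B (Python) =====
-- def is_bijective(set1):
--     vals = sorted(set1.values())
--     return all(a != b for a, b in zip(vals, vals[1:]))
-- ===== Notes on version B (the rewrite author's own statement) =====
-- stated objective: alternative
-- what changed: Replaces A's seen-list membership loop with early break by sorting the values and scanning adjacent pairs: duplicates, if any, become neighbours after sorting.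
import Mathlib
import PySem

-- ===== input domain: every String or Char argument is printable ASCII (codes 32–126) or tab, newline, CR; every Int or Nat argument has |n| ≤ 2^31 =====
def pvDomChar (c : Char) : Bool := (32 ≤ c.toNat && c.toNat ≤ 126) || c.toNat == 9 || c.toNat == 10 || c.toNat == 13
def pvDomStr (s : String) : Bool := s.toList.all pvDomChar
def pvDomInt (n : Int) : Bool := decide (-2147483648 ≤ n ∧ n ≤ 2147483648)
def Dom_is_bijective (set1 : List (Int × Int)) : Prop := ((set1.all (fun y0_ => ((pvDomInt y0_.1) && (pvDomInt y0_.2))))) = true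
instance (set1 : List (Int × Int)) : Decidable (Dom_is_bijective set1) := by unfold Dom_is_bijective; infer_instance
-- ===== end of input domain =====

-- B replaces A's seen-list membership loop by sorting the values and scanning adjacent pairs; return-value equivalence only.

-- ===== PORT A =====
-- loop 'for i in set1: b = set1[i]; if b in the_list_cuh: … break; else: append'
-- (set1[i] is ported with Dict.get?; the 'none' branch is unreachable since i is drawn from the dict's own keys)
def isBijLoopA (d : PySem.Dict Int Int) : List Int → List Int → Bool
  | [], _ => true
  | i :: rest, the_list_cuh =>
    match d.get? i with
    | none => true
    | some b =>
      if the_list_cuh.contains b then false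
      else isBijLoopA d rest (the_list_cuh ++ [b])

def is_bijective (set1 : List (Int × Int)) : Bool :=
  isBijLoopA (PySem.Dict.mk set1) (PySem.Dict.mk set1).keys []

-- ===== PORT B =====
-- vals = sorted(set1.values()); all(a != b for a, b in zip(vals, vals[1:]))
-- (vals[1:] on a list is its tail: slice from index 1)
def is_bijective_alt (set1 : List (Int × Int)) : Bool :=
  let vals := PySem.List.sorted (PySem.Dict.mk set1).values (fun x => x) false
  (vals.zip vals.tail).all (fun p => p.1 != p.2)

-- ===== PRECONDITION & SPEC =====
-- The keys of a Python dict are unique: association lists with a duplicated first component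
-- do not represent any dict input, so they lie outside the precondition.
def Pre_is_bijective (set1 : List (Int × Int)) : Prop := (set1.map Prod.fst).Nodup
instance (set1 : List (Int × Int)) : Decidable (Pre_is_bijective set1) := by unfold Pre_is_bijective; infer_instance
def pvWitness_is_bijective : (List (Int × Int)) := [(0, 1), (1, 1)]

def Spec_is_bijective (set1 : List (Int × Int)) (out : Bool) : Prop := out = is_bijective_alt set1
instance (set1 : List (Int × Int)) (out : Bool) : Decidable (Spec_is_bijective set1 out) := by unfold Spec_is_bijective; infer_instance

-- ===== CLAIM =====
def Claim_equal_is_bijective : Prop := ∀ (set1 : List (Int × Int)), Dom_is_bijective set1 → Pre_is_bijective set1 → Spec_is_bijective set1 (is_bijective set1)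

-- ===== LEMMAS AND PROOFS =====

-- A's loop specialised to the value sequence (one value per key, in key order).
def loopV : List Int → List Int → Bool
  | [], _ => true
  | b :: rest, acc => if acc.contains b then false else loopV rest (acc ++ [b])

theorem isBijLoopA_eq_loopV (d : PySem.Dict Int Int) (l : List (Int × Int)) (acc : List Int)
    (h : ∀ p ∈ l, d.get? p.1 = some p.2) :
    isBijLoopA d (l.map Prod.fst) acc = loopV (l.map Prod.snd) acc := by
  induction l generalizing acc with
  | nil => rfl
  | cons p rest ih =>
    have hp : d.get? p.1 = some p.2 := h p (by simp)
    simp only [List.map_cons, isBijLoopA, hp, loopV]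
    split
    · rfl
    · exact ih _ (fun q hq => h q (by simp [hq]))

-- A's loop answers: are the values (together with the accumulator) all distinct?
theorem loopV_eq_nodup (vs : List Int) (acc : List Int) (hacc : acc.Nodup) :
    loopV vs acc = decide (acc ++ vs).Nodup := by
  induction vs generalizing acc with
  | nil => simp [loopV, hacc]
  | cons b rest ih =>
    simp only [loopV]
    by_cases hb : acc.contains b = true
    · have hmem : b ∈ acc := by simpa using hb
      rw [if_pos hb]
      symm
      simp only [decide_eq_false_iff_not]
      intro hnd
      exact (List.disjoint_of_nodup_append hnd) hmem (by simp)
    · have hmem : b ∉ acc := by simpa using hb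
      rw [if_neg hb, ih (acc ++ [b]) (List.Nodup.append hacc (List.nodup_singleton b) (by simpa using hmem))]
      congr 1
      rw [List.append_assoc]
      rfl

-- adjacent-pairs scan = IsChain (≠)
theorem allZip_eq_isChain (vs : List Int) :
    ((vs.zip vs.tail).all (fun p => p.1 != p.2)) = decide (vs.IsChain (· ≠ ·)) := by
  induction vs with
  | nil => simp
  | cons a t ih =>
    cases t with
    | nil => simp
    | cons b r =>
      simp only [List.tail_cons, List.zip_cons_cons, List.all_cons,
        List.isChain_cons_cons, Bool.decide_and]
      rw [List.tail_cons] at ih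
      rw [ih]
      congr 1
      simp [bne, decide_not, beq_eq_decide]

-- adjacent distinctness on a ≤-sorted list upgrades to adjacent strictness
theorem isChain_lt_of_le_ne (l : List Int) (h1 : l.IsChain (· ≤ ·)) (h2 : l.IsChain (· ≠ ·)) :
    l.IsChain (· < ·) := by
  induction l with
  | nil => exact List.isChain_nil
  | cons a t ih =>
    cases t with
    | nil => exact List.isChain_singleton a
    | cons b r =>
      rw [List.isChain_cons_cons] at h1 h2 ⊢
      exact ⟨lt_of_le_of_ne h1.1 h2.1, ih h1.2 h2.2⟩

-- for a ≤-sorted list, no adjacent duplicates = no duplicates at all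
theorem nodup_iff_isChain_ne (l : List Int) (hle : l.Pairwise (· ≤ ·)) :
    l.Nodup ↔ l.IsChain (· ≠ ·) := by
  constructor
  · intro h
    exact List.Pairwise.isChain h
  · intro h
    have hlt : l.IsChain (· < ·) := isChain_lt_of_le_ne l (List.Pairwise.isChain hle) h
    exact (List.isChain_iff_pairwise.mp hlt).imp ne_of_lt

theorem is_bijective_spec : Claim_equal_is_bijective := by
  intro set1 _ hpre
  unfold Spec_is_bijective is_bijective is_bijective_alt
  have hkeys : (PySem.Dict.mk set1).keys = set1.map Prod.fst := by
    simp [PySem.Dict.keys]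
  have hvals : (PySem.Dict.mk set1).values = set1.map Prod.snd := by
    simp [PySem.Dict.values]
  have hnd : (PySem.Dict.mk set1).keys.Nodup := by rw [hkeys]; exact hpre
  have hget : ∀ p ∈ set1, (PySem.Dict.mk set1).get? p.1 = some p.2 := by
    intro p hp
    exact PySem.Dict.get?_of_mem_items (d := PySem.Dict.mk set1) (k := p.1) (v := p.2)
      (by simpa [PySem.Dict.items] using hp) hnd
  set vals := PySem.List.sorted (set1.map Prod.snd) (fun x => x) false with hv
  have hperm : vals.Perm (set1.map Prod.snd) := PySem.List.sorted_perm _ _ _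
  have hpw : vals.Pairwise (· ≤ ·) := by
    have := PySem.List.sorted_pairwise (xs := set1.map Prod.snd) (key := fun x => x)
    simpa [hv] using this
  rw [hkeys, hvals, isBijLoopA_eq_loopV _ _ _ hget, loopV_eq_nodup _ _ (by simp)]
  simp only [List.nil_append]
  show decide (set1.map Prod.snd).Nodup = ((vals.zip vals.tail).all fun p => p.1 != p.2)
  rw [allZip_eq_isChain]
  congr 1
  rw [eq_iff_iff, ← hperm.nodup_iff]
  exact nodup_iff_isChain_ne vals hpw
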